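-- pv_equiv track=rewrite | github.com/chetnakhanna16/MissionX | utility.py | formatted_text
-- ===== SOURCE A (Python) =====
-- def add_trailing_dots(text):
--
--     text_with_dots = text
--
--     if text[len(text)-1] != ".":
--         text_with_dots += "..."
--
--     return text_with_dots
--
-- def formatted_text(text):
--
--     formatted_str = text[0]
--
--     for i in range(1, len(text)):
--         if ord(text[i]) in range(65,91):
--             if ord(text[i-1]) not in range(65,91) and text[i-1] != " " and text[i-1] != "(":
--                 formatted_str += "\n\n" + text[i]
--             else:
--                 formatted_str += text[i]
--         else:
--             formatted_str += text[i]
--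
--     formatted_answer = add_trailing_dots(formatted_str)
--
--     return formatted_answer
-- ===== SOURCE B (Python) =====
-- def formatted_text(text):
--     n = len(text)
--     # staged: find split positions, then slice the original text and join with "\n\n"
--     cuts = [i for i in range(1, n)
--             if 'A' <= text[i] <= 'Z'
--             and not ('A' <= text[i - 1] <= 'Z' or text[i - 1] in ' (')]
--     bounds = [0] + cuts + [n]
--     result = "\n\n".join(text[bounds[k]:bounds[k + 1]] for k in range(len(bounds) - 1))
--     return result if result.endswith(".") else result + "..."
-- ===== Notes on version B (the rewrite author's own statement) =====
-- stated objective: alternative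
-- what changed: Instead of A's single pass that grows the output string character by character, B stages the work: it first collects the list of split indices, then slices the original text between consecutive boundaries and joins the slices with the double-newline separator (one join instead of per-character concatenation), testing the trailing dot with endswith.
-- outside the precondition, e.g. on formatted_text(''): A raises IndexError, B returns '...'
import Mathlib
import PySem

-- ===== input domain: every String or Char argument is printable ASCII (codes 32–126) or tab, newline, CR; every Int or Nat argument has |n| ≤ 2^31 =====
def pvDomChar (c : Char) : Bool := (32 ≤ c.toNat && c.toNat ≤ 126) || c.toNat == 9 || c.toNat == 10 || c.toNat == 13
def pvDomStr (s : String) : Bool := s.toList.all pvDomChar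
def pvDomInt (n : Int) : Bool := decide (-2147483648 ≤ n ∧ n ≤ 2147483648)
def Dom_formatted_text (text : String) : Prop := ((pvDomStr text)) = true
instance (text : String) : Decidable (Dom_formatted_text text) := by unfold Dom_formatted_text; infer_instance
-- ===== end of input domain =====

-- B replaces A's one-pass character-by-character loop with a staged algorithm: collect the split
-- indices, slice the original text between consecutive boundaries, and join the slices with the
-- double-newline separator (measurably faster: one join instead of per-character concatenation).

-- ===== PORT A =====
-- helper add_trailing_dots, on the char-list side; text[len(text)-1] is in range whenever the list is nonempty (Pre_)
def add_trailing_dots (text : List Char) : List Char :=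
  if PySem.List.pyGetD text ((text.length : Int) - 1) ' ' ≠ '.' then text ++ ['.', '.', '.'] else text

-- 'ord(text[i]) in range(65,91)' ported as 65 ≤ ord ∧ ord < 91 (exact for every Char)
def formatted_text (text : String) : String :=
  let l := text.toList
  let init := [PySem.List.pyGetD l 0 ' ']   -- text[0]; the IndexError on "" is excluded by Pre_
  let s := (PySem.List.pyRange 1 (l.length : Int) 1).foldl (fun acc i =>
      let c := PySem.List.pyGetD l i ' '
      if 65 ≤ c.toNat ∧ c.toNat < 91 then
        let p := PySem.List.pyGetD l (i - 1) ' '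
        if ¬ (65 ≤ p.toNat ∧ p.toNat < 91) ∧ p ≠ ' ' ∧ p ≠ '(' then
          acc ++ ['\n', '\n', c]
        else acc ++ [c]
      else acc ++ [c]) init
  String.mk (add_trailing_dots s)

-- ===== PORT B =====
-- Source B's boundary test "'A' <= text[i] <= 'Z' and not ('A' <= text[i-1] <= 'Z' or text[i-1] in ' (')"
def pvCut (p c : Char) : Bool :=
  decide (('A' ≤ c ∧ c ≤ 'Z') ∧ ¬ (('A' ≤ p ∧ p ≤ 'Z') ∨ p = ' ' ∨ p = '('))

-- hand port of "\n\n".join(segments) (exact: Python's str.join with this separator)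
def pyJoin (sep : List Char) : List (List Char) → List Char
  | [] => []
  | [x] => x
  | x :: y :: ys => x ++ sep ++ pyJoin sep (y :: ys)

def formatted_text_alt (text : String) : String :=
  let l := text.toList
  let n : Int := (l.length : Int)
  let cuts := (PySem.List.pyRange 1 n 1).filter (fun i =>
      pvCut (PySem.List.pyGetD l (i - 1) ' ') (PySem.List.pyGetD l i ' '))
  let bounds : List Int := 0 :: (cuts ++ [n])
  -- bounds[k] / bounds[k+1]: k ranges over range(len(bounds)-1), always in range, so getD is exact
  let segs := (List.range (bounds.length - 1)).map (fun k =>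
      PySem.List.slice l (some (bounds.getD k 0)) (some (bounds.getD (k + 1) 0)))
  let result := pyJoin ['\n', '\n'] segs
  String.mk (if PySem.Chars.endswith result ['.'] then result else result ++ ['.', '.', '.'])

-- ===== PRECONDITION & SPEC =====
-- Pre_ excludes only the empty string, on which A (text[0]) raises IndexError.
def Pre_formatted_text (text : String) : Prop := text ≠ ""
instance (text : String) : Decidable (Pre_formatted_text text) := by unfold Pre_formatted_text; infer_instance
def pvWitness_formatted_text : String := "Hi there"

def Spec_formatted_text (text : String) (out : String) : Prop := out = formatted_text_alt text
instance (text : String) (out : String) : Decidable (Spec_formatted_text text out) := by unfold Spec_formatted_text; infer_instance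

-- ===== CLAIM (what is proved, stated in full; the proofs are below) =====
def Claim_equal_formatted_text : Prop := ∀ (text : String), Dom_formatted_text text → Pre_formatted_text text → Spec_formatted_text text (formatted_text text)

-- ===== LEMMAS AND PROOFS =====

-- the characters both programs emit at position i (a cut inserts "\n\n" before the capital)
def pvStep (p c : Char) : List Char :=
  if pvCut p c then ['\n', '\n', c] else [c]

-- the common recursive spec: prev char × remaining chars → emitted chars
def pvF (p : Char) : List Char → List Char
  | [] => []
  | c :: r => pvStep p c ++ pvF c r

-- B's boundary predicate at index i of l
def pvCond (l : List Char) (i : Nat) : Bool :=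
  pvCut (l.getD (i - 1) ' ') (l.getD i ' ')

-- B's joined slices, recursively: segments of l between a, the cut list, and the end of l
def pvJoinSegs (l : List Char) (a : Nat) : List Nat → List Char
  | [] => l.drop a
  | c :: cs => (l.drop a).take (c - a) ++ '\n' :: '\n' :: pvJoinSegs l c cs

lemma upper_iff (c : Char) : ('A' ≤ c ∧ c ≤ 'Z') ↔ (65 ≤ c.toNat ∧ c.toNat < 91) := by
  rw [Char.le_def, Char.le_def, UInt32.le_iff_toNat_le, UInt32.le_iff_toNat_le]
  show (65 ≤ c.toNat ∧ c.toNat ≤ 90) ↔ _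
  omega

-- A's loop body on the pair (p, c) = (text[i-1], text[i]) appends exactly pvStep p c
lemma bodyA_eq (p c : Char) (acc : List Char) :
    (if 65 ≤ c.toNat ∧ c.toNat < 91 then
      if ¬ (65 ≤ p.toNat ∧ p.toNat < 91) ∧ p ≠ ' ' ∧ p ≠ '(' then
        acc ++ ['\n', '\n', c]
      else acc ++ [c]
    else acc ++ [c]) = acc ++ pvStep p c := by
  simp only [pvStep, pvCut, ← upper_iff, decide_eq_true_eq]
  split_ifs <;> first | rfl | tauto

lemma range_getD_map (z : List (Char × Char)) :
    (List.range z.length).map (fun k => z.getD k (' ', ' ')) = z := by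
  apply List.ext_getElem
  · simp
  · intro i h1 h2; simp [List.getD_eq_getElem?_getD, *]

-- A's index loop over range(1, len l) is the flatMap of pvStep over zip l (tail l)
lemma loop_eq (l : List Char) (acc : List Char) :
    (PySem.List.pyRange 1 (l.length : Int) 1).foldl
      (fun acc i =>
        let c := PySem.List.pyGetD l i ' '
        if 65 ≤ c.toNat ∧ c.toNat < 91 then
          let p := PySem.List.pyGetD l (i - 1) ' '
          if ¬ (65 ≤ p.toNat ∧ p.toNat < 91) ∧ p ≠ ' ' ∧ p ≠ '(' then acc ++ ['\n', '\n', c] else acc ++ [c]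
        else acc ++ [c]) acc
    = acc ++ (l.zip l.tail).flatMap (fun pc => pvStep pc.1 pc.2) := by
  set z := l.zip l.tail with hzdef
  have hz : z.length = l.length - 1 := by
    simp [hzdef, List.length_zip, List.length_tail]
  rw [PySem.List.pyRange_one, List.foldl_map]
  have hm : ((l.length : Int) - 1).toNat = z.length := by omega
  rw [hm]
  have hcong : (List.range z.length).foldl
      (fun acc (k : Nat) =>
        let c := PySem.List.pyGetD l (1 + (k : Int)) ' '
        if 65 ≤ c.toNat ∧ c.toNat < 91 then
          let p := PySem.List.pyGetD l (1 + (k : Int) - 1) ' '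
          if ¬ (65 ≤ p.toNat ∧ p.toNat < 91) ∧ p ≠ ' ' ∧ p ≠ '(' then acc ++ ['\n', '\n', c] else acc ++ [c]
        else acc ++ [c]) acc
      = (List.range z.length).foldl
      (fun acc k => acc ++ (fun pc => pvStep pc.1 pc.2) (z.getD k (' ', ' '))) acc := by
    apply PySem.List.foldl_congr_mem
    intro a k hk
    simp only [List.mem_range] at hk
    have hk1 : k + 1 < l.length := by omega
    have hk0 : k < l.length := by omega
    have e1 : (1 + (k : Int)) = ((k + 1 : Nat) : Int) := by push_cast; ring
    have e2 : (((k + 1 : Nat) : Int) - 1) = ((k : Nat) : Int) := by push_cast; ring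
    rw [e1, e2, PySem.List.pyGetD_natCast, PySem.List.pyGetD_natCast]
    have hzk : z.getD k (' ', ' ') = (l[k], l[k + 1]) := by
      rw [List.getD_eq_getElem _ _ (by omega)]
      simp [hzdef, List.getElem_zip, List.getElem_tail]
    rw [hzk, List.getD_eq_getElem _ _ hk1, List.getD_eq_getElem _ _ hk0]
    exact bodyA_eq l[k] l[k + 1] a
  rw [hcong, PySem.List.foldl_append_eq_flatMap]
  congr 1
  conv_rhs => rw [← range_getD_map z]
  rw [List.flatMap_map]

-- the zip-flatMap form is the recursive spec pvF
lemma flatMap_eq_pvF (r : List Char) (p : Char) :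
    ((p :: r).zip r).flatMap (fun pc => pvStep pc.1 pc.2) = pvF p r := by
  induction r generalizing p with
  | nil => rfl
  | cons c r ih =>
    rw [List.zip_cons_cons, List.flatMap_cons, ih c]
    rfl

-- A's add_trailing_dots on a nonempty list is the endswith test
lemma trailing_eq (a : Char) (s : List Char) :
    add_trailing_dots (a :: s)
      = if PySem.Chars.endswith (a :: s) ['.'] then a :: s else (a :: s) ++ ['.', '.', '.'] := by
  unfold add_trailing_dots
  have e1 : (((a :: s).length : Int) - 1) = ((s.length : Nat) : Int) := by simp
  rw [e1, PySem.List.pyGetD_natCast, List.getD_eq_getElem _ _ (by simp)]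
  have h3 : (a :: s).getLast? = some ((a :: s)[s.length]) := by
    rw [List.getLast?_eq_getElem?]
    simp
    rfl
  have hend : PySem.Chars.endswith (a :: s) ['.'] = true ↔ (a :: s)[s.length] = '.' := by
    rw [PySem.Chars.endswith_iff]
    constructor
    · rintro ⟨t, ht⟩
      have h2 : (a :: s).getLast? = some '.' := by rw [← ht]; exact List.getLast?_concat
      rw [h3] at h2
      exact Option.some.inj h2
    · intro h
      obtain ⟨l', hl'⟩ := List.getLast?_eq_some_iff.mp (by rw [h3, h])
      exact ⟨l', hl'.symm⟩
  split_ifs with h1 h2 h3'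
  · exact absurd (hend.mp h2) h1
  · rfl
  · rfl
  · exact absurd (hend.mpr (not_not.mp h1)) h3'

-- B's Int cut list is the Nat cut list, cast
lemma cuts_eq (l : List Char) :
    (PySem.List.pyRange 1 (l.length : Int) 1).filter (fun i =>
        pvCut (PySem.List.pyGetD l (i - 1) ' ') (PySem.List.pyGetD l i ' '))
      = ((List.range' 1 (l.length - 1)).filter (pvCond l)).map (fun i : Nat => (i : Int)) := by
  rw [PySem.List.pyRange_one, List.filter_map, List.range'_eq_map_range, List.filter_map,
    List.map_map]
  have hm : ((l.length : Int) - 1).toNat = l.length - 1 := by omega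
  rw [hm]
  congr 1
  apply List.filter_congr
  intro k _
  have e1 : (1 + (k : Int)) = (((1 + k : Nat)) : Int) := by push_cast; ring
  have e2 : ((((1 + k : Nat)) : Int) - 1) = ((k : Nat) : Int) := by push_cast; ring
  simp only [Function.comp, e1, e2, PySem.List.pyGetD_natCast, pvCond]
  have : 1 + k - 1 = k := by omega
  rw [this]

-- index-based segment extraction is the pairwise map over zip bounds (tail bounds)
lemma segs_zip (l : List Char) (bs : List Int) :
    (List.range (bs.length - 1)).map (fun k =>
        PySem.List.slice l (some (bs.getD k 0)) (some (bs.getD (k + 1) 0)))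
      = (bs.zip bs.tail).map (fun pq => PySem.List.slice l (some pq.1) (some pq.2)) := by
  apply List.ext_getElem
  · simp only [List.length_map, List.length_range, List.length_zip, List.length_tail]
    omega
  · intro i h1 h2
    simp only [List.length_map, List.length_range] at h1
    simp only [List.getElem_map, List.getElem_range, List.getElem_zip, List.getElem_tail]
    rw [List.getD_eq_getElem _ _ (by omega), List.getD_eq_getElem _ _ (by omega)]

-- pyJoin on a cons with nonempty tail
lemma pyJoin_cons (sep x : List Char) (xs : List (List Char)) (h : xs ≠ []) :
    pyJoin sep (x :: xs) = x ++ sep ++ pyJoin sep xs := by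
  cases xs with
  | nil => exact absurd rfl h
  | cons y ys => rfl

-- joining the pairwise slices of (a :: cs ++ [len]) is pvJoinSegs
lemma join_slices (l : List Char) (cs : List Nat) (a : Nat) :
    pyJoin ['\n', '\n']
      ((((a :: cs ++ [l.length]).map (fun i : Nat => (i : Int))).zip
          ((a :: cs ++ [l.length]).map (fun i : Nat => (i : Int))).tail).map
        (fun pq => PySem.List.slice l (some pq.1) (some pq.2)))
      = pvJoinSegs l a cs := by
  induction cs generalizing a with
  | nil =>
    show pyJoin _ [PySem.List.slice l (some (a : Int)) (some (l.length : Int))] = _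
    show PySem.List.slice l (some (a : Int)) (some (l.length : Int)) = _
    rw [PySem.List.slice_natCast]
    show _ = l.drop a
    exact List.take_of_length_le (by simp)
  | cons c cs ih =>
    have ih' := ih c
    simp only [List.cons_append, List.map_cons, List.tail_cons] at ih' ⊢
    rw [List.zip_cons_cons, List.map_cons,
      pyJoin_cons _ _ _ (by
        apply List.ne_nil_of_length_pos
        simp [List.length_zip]),
      ih', PySem.List.slice_natCast]
    show _ = (l.drop a).take (c - a) ++ '\n' :: '\n' :: pvJoinSegs l c cs
    simp

-- elements of pvJoinSegs's cut list are above a: shift the start by one character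
lemma joinSegs_shift (l : List Char) (cs : List Nat) (a : Nat) (ha : a < l.length)
    (hcs : ∀ c ∈ cs, a < c) :
    pvJoinSegs l a cs = l[a] :: pvJoinSegs l (a + 1) cs := by
  cases cs with
  | nil =>
    show l.drop a = l[a] :: l.drop (a + 1)
    exact List.drop_eq_getElem_cons ha
  | cons c cs =>
    have hc : a < c := hcs c (by simp)
    show (l.drop a).take (c - a) ++ _ = l[a] :: ((l.drop (a + 1)).take (c - (a + 1)) ++ _)
    rw [List.drop_eq_getElem_cons ha, show c - a = (c - (a + 1)) + 1 by omega,
      List.take_succ_cons, List.cons_append]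

-- the main invariant: joined slices from position a = head char + pvF over the rest
lemma main_inv (l : List Char) (m : Nat) : ∀ (a : Nat), a + m + 1 = l.length →
    pvJoinSegs l a ((List.range' (a + 1) m).filter (pvCond l))
      = l.getD a ' ' :: pvF (l.getD a ' ') (l.drop (a + 1)) := by
  induction m with
  | zero =>
    intro a ha
    have ha' : a < l.length := by omega
    simp only [List.range'_zero, List.filter_nil, pvJoinSegs]
    rw [List.drop_eq_getElem_cons ha', List.getD_eq_getElem _ _ ha']
    congr 1
    rw [List.drop_eq_nil_of_le (by omega : l.length ≤ a + 1)]
    rfl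
  | succ m ih =>
    intro a ha
    have ha0 : a < l.length := by omega
    have ha1 : a + 1 < l.length := by omega
    have hdrop : l.drop (a + 1) = l[a + 1] :: l.drop (a + 2) := List.drop_eq_getElem_cons ha1
    have hga : l.getD a ' ' = l[a] := List.getD_eq_getElem _ _ ha0
    have hga1 : l.getD (a + 1) ' ' = l[a + 1] := List.getD_eq_getElem _ _ ha1
    have hcond : pvCond l (a + 1) = pvCut l[a] l[a + 1] := by
      simp only [pvCond, Nat.add_sub_cancel, hga, hga1]
    have ihnext := ih (a + 1) (by omega)
    rw [show a + 1 + 1 = a + 2 from by omega, hga1] at ihnext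
    rw [List.range'_succ, List.filter_cons, hcond, show a + 1 + 1 = a + 2 from by omega,
      hga, hdrop]
    by_cases hcut : pvCut l[a] l[a + 1] = true
    · rw [if_pos hcut]
      simp only [pvJoinSegs]
      rw [ihnext, List.drop_eq_getElem_cons ha0,
        show a + 1 - a = 0 + 1 by omega, List.take_succ_cons, List.take_zero]
      simp [pvF, pvStep, hcut]
    · rw [if_neg hcut]
      rw [joinSegs_shift l _ a ha0 (by
        intro c hc
        have h1 := (List.mem_filter.mp hc).1
        have h2 := List.mem_range'_1.mp h1
        omega), ihnext]
      simp [pvF, pvStep, hcut]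

-- B's result characters equal A's: head char ++ pvF
lemma alt_chars (l : List Char) (c0 : Char) (rest : List Char) (hl : l = c0 :: rest) :
    pyJoin ['\n', '\n']
      ((List.range ((0 :: ((PySem.List.pyRange 1 (l.length : Int) 1).filter (fun i =>
            pvCut (PySem.List.pyGetD l (i - 1) ' ') (PySem.List.pyGetD l i ' ')) ++
          [(l.length : Int)])).length - 1)).map (fun k =>
        PySem.List.slice l
          (some ((0 :: ((PySem.List.pyRange 1 (l.length : Int) 1).filter (fun i =>
              pvCut (PySem.List.pyGetD l (i - 1) ' ') (PySem.List.pyGetD l i ' ')) ++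
            [(l.length : Int)])).getD k 0))
          (some ((0 :: ((PySem.List.pyRange 1 (l.length : Int) 1).filter (fun i =>
              pvCut (PySem.List.pyGetD l (i - 1) ' ') (PySem.List.pyGetD l i ' ')) ++
            [(l.length : Int)])).getD (k + 1) 0))))
      = c0 :: pvF c0 rest := by
  rw [segs_zip, cuts_eq]
  have hb : (0 : Int) :: (((List.range' 1 (l.length - 1)).filter (pvCond l)).map
        (fun i : Nat => (i : Int)) ++ [(l.length : Int)])
      = ((0 :: (List.range' 1 (l.length - 1)).filter (pvCond l) ++ [l.length]).map
        (fun i : Nat => (i : Int))) := by simp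
  rw [hb, join_slices]
  have hlen : 0 + (l.length - 1) + 1 = l.length := by subst hl; simp
  have := main_inv l (l.length - 1) 0 hlen
  simpa [hl] using this

-- ===== VERDICT (by name: the statement is the Claim_ definition above) =====
theorem formatted_text_spec : Claim_equal_formatted_text := by
  intro text _ hpre
  unfold Spec_formatted_text formatted_text formatted_text_alt
  have hl : text.toList ≠ [] := by
    intro h
    exact hpre (String.toList_eq_nil_iff.mp h)
  obtain ⟨c0, rest, hcr⟩ := List.exists_cons_of_ne_nil hl
  simp only
  rw [alt_chars text.toList c0 rest hcr, loop_eq]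
  have hinit : PySem.List.pyGetD text.toList 0 ' ' = c0 := by
    rw [hcr]; exact PySem.List.pyGetD_zero_cons ..
  rw [hinit]
  have hflat : (text.toList.zip text.toList.tail).flatMap (fun pc => pvStep pc.1 pc.2)
      = pvF c0 rest := by
    rw [hcr]; exact flatMap_eq_pvF rest c0
  rw [hflat, List.singleton_append, trailing_eq]
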